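-- pv_equiv track=rewrite | github.com/aarushroyy/tictactoe | bots/rl_bot.py | _state_to_index
-- ===== SOURCE A (Python) =====
-- def _state_to_index(state_str):
--     """Convert state string to index in the weights array"""
--     base3 = 0
--     for i, char in enumerate(state_str):
--         if char == 'X':
--             value = 0
--         elif char == 'O':
--             value = 1
--         else:
--             value = 2
--         base3 += value * (3 ** i)
--     return base3
-- ===== SOURCE B (Python) =====
-- def _state_to_index(state_str):
--     """Convert state string to index in the weights array (Horner, reversed)."""
--     acc = 0
--     for char in reversed(state_str):
--         acc = acc * 3 + (0 if char == 'X' else 1 if char == 'O' else 2)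
--     return acc
-- ===== Notes on version B (the rewrite author's own statement) =====
-- stated objective: simpler
-- what changed: Replaces the enumerate loop computing 3**i per character with Horner's method: a single accumulator acc = acc*3 + digit over the reversed string, eliminating the explicit exponentiation.
import Mathlib
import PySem

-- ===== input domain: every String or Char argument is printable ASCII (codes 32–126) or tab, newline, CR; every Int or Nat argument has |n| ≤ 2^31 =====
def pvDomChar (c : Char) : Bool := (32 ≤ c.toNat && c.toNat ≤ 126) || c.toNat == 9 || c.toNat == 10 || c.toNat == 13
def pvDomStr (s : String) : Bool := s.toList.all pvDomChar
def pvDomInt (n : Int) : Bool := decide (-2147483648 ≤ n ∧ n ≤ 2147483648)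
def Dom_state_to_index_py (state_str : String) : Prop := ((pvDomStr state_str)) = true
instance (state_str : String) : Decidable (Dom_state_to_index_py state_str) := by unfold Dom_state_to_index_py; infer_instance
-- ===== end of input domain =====

-- B replaces A's per-character 3**i exponentiation by Horner's method over the reversed string (simpler).


-- ===== PORT A =====
-- value of a character, shared branch order X / O / else
def pvVal (c : Char) : Int := if c = 'X' then 0 else if c = 'O' then 1 else 2

-- A's loop: for i, char in enumerate(state_str): base3 += value * 3**i
def pvALoop : Int → Nat → List Char → Int
  | base3, _, [] => base3
  | base3, i, c :: cs => pvALoop (base3 + pvVal c * (3 : Int) ^ i) (i + 1) cs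

def state_to_index_py (state_str : String) : Int :=
  pvALoop 0 0 state_str.toList

-- ===== PORT B =====
-- B's loop: for char in reversed(state_str): acc = acc*3 + v
def pvBLoop : Int → List Char → Int
  | acc, [] => acc
  | acc, c :: cs => pvBLoop (acc * 3 + pvVal c) cs

def state_to_index_py_alt (state_str : String) : Int :=
  pvBLoop 0 state_str.toList.reverse

-- ===== PRECONDITION & SPEC =====
def Spec_state_to_index_py (state_str : String) (out : Int) : Prop := out = state_to_index_py_alt state_str
instance (state_str : String) (out : Int) : Decidable (Spec_state_to_index_py state_str out) := by unfold Spec_state_to_index_py; infer_instance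

-- ===== CLAIM (what is proved, stated in full; the proofs are below) =====
def Claim_equal_state_to_index_py : Prop := ∀ (state_str : String), Dom_state_to_index_py state_str → Spec_state_to_index_py state_str (state_to_index_py state_str)

-- ===== LEMMAS AND PROOFS =====
theorem pvBLoop_append (xs ys : List Char) (a : Int) :
    pvBLoop a (xs ++ ys) = pvBLoop (pvBLoop a xs) ys := by
  induction xs generalizing a with
  | nil => rfl
  | cons c cs ih => simp [pvBLoop, ih]

-- Horner value of a list, first char least significant
theorem pvBLoop_reverse_cons (c : Char) (l : List Char) :
    pvBLoop 0 (c :: l).reverse = 3 * pvBLoop 0 l.reverse + pvVal c := by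
  simp [List.reverse_cons, pvBLoop_append, pvBLoop]
  ring

theorem pvALoop_eq (l : List Char) : ∀ (a : Int) (i : Nat),
    pvALoop a i l = a + (3 : Int) ^ i * pvBLoop 0 l.reverse := by
  induction l with
  | nil => intro a i; simp [pvALoop, pvBLoop]
  | cons c cs ih =>
    intro a i
    rw [pvALoop, ih, pvBLoop_reverse_cons, pow_succ]
    ring

-- ===== VERDICT (by name: the statement is the Claim_ definition above) =====
theorem state_to_index_py_spec : Claim_equal_state_to_index_py := by
  intro s _
  unfold Spec_state_to_index_py state_to_index_py state_to_index_py_alt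
  rw [pvALoop_eq]
  ring
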